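-- pv_equiv track=rewrite | github.com/MatsukSket/AOIS | lab2_truth_table/src/minimization.py | get_prime_implicants_karnaugh_map
-- ===== SOURCE A (Python) =====
-- def generate_gray_code(bits):
--     """Рекурсивная генерация кода Грея для любого количества бит."""
--     if bits == 0:
--         return [""]
--     if bits == 1:
--         return ["0", "1"]
--     previous = generate_gray_code(bits - 1)
--     # Зеркальное отражение: добавляем 0 к прямой последовательности и 1 к обратной
--     return ["0" + code for code in previous] + ["1" + code for code in reversed(previous)]
--
-- def get_grid_cells(row_codes: list, col_codes: list, r_start: int, c_start: int, h: int, w: int) -> list: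
--     """Собирает ячейки прямоугольника размером h на w."""
--     R = len(row_codes)
--     C = len(col_codes)
--     cells = []
--
--     for i in range(h):
--         for j in range(w):
--             r = (r_start + i) % R
--             c = (c_start + j) % C
--             cells.append(row_codes[r] + col_codes[c])
--
--     return cells
--
-- def get_karnaugh_map_rectangles(table: list, is_dnf: bool = True) -> list:
--     """Поиск прямоугольных областей (импликант) на карте Карно."""
--     target = 1 if is_dnf else 0
--     val_map = {"".join(map(str, row[:-1])): row[-1] for row in table}
--
--     if not table:
--         return []
--
--     num_vars = len(table[0]) - 1
--     row_vars_count = num_vars // 2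
--     col_vars_count = num_vars - row_vars_count
--
--     row_codes = generate_gray_code(row_vars_count)
--     col_codes = generate_gray_code(col_vars_count)
--
--     R = len(row_codes)
--     C = len(col_codes)
--
--     valid_rects = []
--     sizes = [1, 2, 4, 8]
--
--     for h in sizes:
--         if h > R: continue
--         for w in sizes:
--             if w > C: continue
--
--             for r in range(R):
--                 for c in range(C):
--                     cells = get_grid_cells(row_codes, col_codes, r, c, h, w)
--                     if all(val_map.get(cell, -1) == target for cell in cells):
--                         valid_rects.append(set(cells))
--
--     prime_rects = []
--     for rect in valid_rects:
--         is_prime = True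
--         for other_rect in valid_rects:
--             if rect != other_rect and rect.issubset(other_rect):
--                 is_prime = False
--                 break
--
--         if is_prime and rect not in prime_rects:
--             prime_rects.append(rect)
--
--     return prime_rects
--
-- def rect_to_mask(rect_cells: set, num_vars: int) -> str:
--     """Формиует бинарную маску для прямоугольника."""
--     cells_list = list(rect_cells)
--     mask = ""
--
--     for i in range(num_vars):
--         bits_at_i = set(cell[i] for cell in cells_list)
--
--         if len(bits_at_i) == 1:
--             mask += bits_at_i.pop()
--         else:
--             mask += "-"
--
--     return mask
--
-- def get_prime_implicants_karnaugh_map(table: list, is_dnf: bool = True) -> list: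
--     """Возвращает список импликант, масок."""
--     if not table:
--         return []
--
--     num_vars = len(table[0]) - 1
--     prime_rects = get_karnaugh_map_rectangles(table, is_dnf)
--
--     implicants = []
--     for rect in prime_rects:
--         implicants.append(rect_to_mask(rect, num_vars))
--
--     return list(set(implicants))
-- ===== SOURCE B (Python) =====
-- def _gray_codes(bits):
--     """Binary-reflected Gray code, built iteratively by mirror-doubling."""
--     codes = [""]
--     for _ in range(bits):
--         codes = ["0" + c for c in codes] + ["1" + c for c in reversed(codes)]
--     return codes
--
-- def get_prime_implicants_karnaugh_map(table: list, is_dnf: bool = True) -> list: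
--     if not table:
--         return []
--     target = 1 if is_dnf else 0
--     val_map = {"".join(map(str, row[:-1])): row[-1] for row in table}
--
--     num_vars = len(table[0]) - 1
--     row_vars_count = num_vars // 2
--     col_vars_count = num_vars - row_vars_count
--     row_codes = _gray_codes(row_vars_count)
--     col_codes = _gray_codes(col_vars_count)
--     R, C = len(row_codes), len(col_codes)
--
--     def is_valid(h, w, r, c):
--         """Is the h-by-w rectangle at (r, c) entirely made of target cells?"""
--         return all(
--             val_map.get(row_codes[(r + i) % R] + col_codes[(c + j) % C], -1) == target
--             for i in range(h) for j in range(w))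
--
--     # A valid rectangle is non-prime exactly when a valid rectangle with one
--     # side doubled covers it, so each rectangle needs only O(h + w) checks.
--     masks = {}
--     for h in (1, 2, 4, 8):
--         if h > R:
--             continue
--         for w in (1, 2, 4, 8):
--             if w > C:
--                 continue
--             for r in range(R):
--                 for c in range(C):
--                     if not is_valid(h, w, r, c):
--                         continue
--                     if 2 * h <= 8 and 2 * h <= R and any(
--                             is_valid(2 * h, w, (r - d) % R, c) for d in range(h + 1)):
--                         continue
--                     if 2 * w <= 8 and 2 * w <= C and any(
--                             is_valid(h, 2 * w, r, (c - d) % C) for d in range(w + 1)):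
--                         continue
--                     cells = [row_codes[(r + i) % R] + col_codes[(c + j) % C]
--                              for i in range(h) for j in range(w)]
--                     mask = "".join(
--                         ch if all(cell[k] == ch for cell in cells) else "-"
--                         for k, ch in enumerate(cells[0]))
--                     masks[mask] = None
--     return list(masks)
-- ===== Notes on version B (the rewrite author's own statement) =====
-- stated objective: faster
-- what changed: B drops A's O(V^2) all-pairs subset scan (and the repeated 'rect not in prime_rects' list scan): a valid rectangle is prime iff no valid rectangle with one side doubled (at the O(h+w) possible aligned offsets) covers it, and masks are deduped directly in one dict instead of deduping rectangle sets first.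
import Mathlib
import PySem

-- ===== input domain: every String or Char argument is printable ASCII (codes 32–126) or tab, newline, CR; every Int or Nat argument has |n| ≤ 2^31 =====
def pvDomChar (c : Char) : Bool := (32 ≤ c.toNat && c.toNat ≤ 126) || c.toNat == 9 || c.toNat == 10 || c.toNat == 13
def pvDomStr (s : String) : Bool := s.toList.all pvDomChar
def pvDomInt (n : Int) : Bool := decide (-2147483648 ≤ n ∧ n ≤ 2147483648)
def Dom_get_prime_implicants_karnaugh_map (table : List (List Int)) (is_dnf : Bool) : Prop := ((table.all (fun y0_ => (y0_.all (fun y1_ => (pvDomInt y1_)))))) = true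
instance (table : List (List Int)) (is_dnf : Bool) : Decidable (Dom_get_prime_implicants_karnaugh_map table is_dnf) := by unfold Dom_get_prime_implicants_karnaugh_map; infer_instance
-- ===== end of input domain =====

-- B replaces A's quadratic all-pairs subset scan for prime rectangles by an O(h+w)
-- doubled-rectangle check per rectangle and dedups masks directly (same return value;
-- A's final list(set(...)) order is hash-dependent, outputs are compared as sets).
-- ===== PORT A =====
-- Codes, cells and masks are handled as `List Char` (ASCII '0'/'1'/'-') and turned into
-- `String`s only when the final result is produced; cell keys, built in Python by
-- `"".join(map(str, row[:-1]))`, are the concatenated character lists of `str(n)`.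

-- "".join(map(str, row[:-1]))
def pvRowKey (row : List Int) : List Char :=
  ((row.dropLast.map PySem.Int.toStr).map String.toList).flatten

-- {key(row): row[-1] for row in table}; rows are nonempty under Pre_, so the
-- `getD 0` fallback for row[-1] is never taken on admitted inputs.
def pvValMap (table : List (List Int)) : PySem.Dict (List Char) Int :=
  table.foldl (fun d row => d.insert (pvRowKey row) ((row.getLast?).getD 0)) PySem.Dict.empty

def generate_gray_code : Nat → List (List Char)
  | 0 => [[]]
  | 1 => [['0'], ['1']]
  | (b+2) =>
    let previous := generate_gray_code (b+1)
    previous.map (fun code => '0' :: code) ++ previous.reverse.map (fun code => '1' :: code)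

def get_grid_cells (row_codes col_codes : List (List Char)) (r_start c_start h w : Nat) :
    List (List Char) :=
  let R := row_codes.length
  let C := col_codes.length
  (List.range h).flatMap (fun i =>
    (List.range w).map (fun j =>
      row_codes.getD ((r_start + i) % R) [] ++ col_codes.getD ((c_start + j) % C) []))

-- s.issubset(t)
def pvSetLe (s t : List (List Char)) : Bool := s.all (fun x => t.contains x)

-- Python set equality (extensional: mutual inclusion)
def pvSetEq (s t : List (List Char)) : Bool := pvSetLe s t && pvSetLe t s

def get_karnaugh_map_rectangles (table : List (List Int)) (is_dnf : Bool) :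
    List (List (List Char)) :=
  let target : Int := if is_dnf then 1 else 0
  let val_map := pvValMap table
  if table = [] then [] else
  let num_vars := (table.headD []).length - 1
  let row_vars_count := num_vars / 2
  let col_vars_count := num_vars - row_vars_count
  let row_codes := generate_gray_code row_vars_count
  let col_codes := generate_gray_code col_vars_count
  let R := row_codes.length
  let C := col_codes.length
  let valid_rects : List (List (List Char)) :=
    [1,2,4,8].flatMap (fun h => if R < h then [] else
      [1,2,4,8].flatMap (fun w => if C < w then [] else
        (List.range R).flatMap (fun r =>
          (List.range C).flatMap (fun c =>
            let cells := get_grid_cells row_codes col_codes r c h w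
            if cells.all (fun cell => val_map.getD cell (-1) == target)
            then [PySem.Set.ofList cells] else []))))
  valid_rects.foldl (fun prime_rects rect =>
    if valid_rects.all (fun other => !(!pvSetEq rect other && pvSetLe rect other))
       && prime_rects.all (fun p => !pvSetEq p rect)
    then prime_rects ++ [rect] else prime_rects) []

def rect_to_mask (rect_cells : List (List Char)) (num_vars : Nat) : List Char :=
  (List.range num_vars).map (fun i =>
    let bits := PySem.Set.ofList (rect_cells.map (fun cell => cell.getD i ' '))
    if bits.length = 1 then bits.headD ' ' else '-')

def get_prime_implicants_karnaugh_map (table : List (List Int)) (is_dnf : Bool) :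
    List String :=
  if table = [] then [] else
  let num_vars := (table.headD []).length - 1
  let prime_rects := get_karnaugh_map_rectangles table is_dnf
  let implicants := prime_rects.map (fun rect => rect_to_mask rect num_vars)
  -- list(set(implicants)): CPython's set order is hash-seed-dependent; ported in
  -- first-occurrence order (the result is compared as a set of strings)
  (PySem.List.dedup implicants).map (fun m => String.mk m)

-- ===== PORT B =====
-- Gray code built iteratively by mirror-doubling
def grayCodesAlt (bits : Nat) : List (List Char) :=
  (List.range bits).foldl
    (fun codes _ => codes.map (fun c => '0' :: c) ++ codes.reverse.map (fun c => '1' :: c))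
    [[]]

-- is_valid(h, w, r, c) of Source B
def isValidRect (val_map : PySem.Dict (List Char) Int) (target : Int)
    (row_codes col_codes : List (List Char)) (h w r c : Nat) : Bool :=
  let R := row_codes.length
  let C := col_codes.length
  (List.range h).all (fun i => (List.range w).all (fun j =>
    val_map.getD (row_codes.getD ((r + i) % R) [] ++ col_codes.getD ((c + j) % C) [])
      (-1) == target))

def get_prime_implicants_karnaugh_map_alt (table : List (List Int)) (is_dnf : Bool) :
    List String :=
  if table = [] then [] else
  let target : Int := if is_dnf then 1 else 0
  let val_map := pvValMap table
  let num_vars := (table.headD []).length - 1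
  let row_vars_count := num_vars / 2
  let col_vars_count := num_vars - row_vars_count
  let row_codes := grayCodesAlt row_vars_count
  let col_codes := grayCodesAlt col_vars_count
  let R := row_codes.length
  let C := col_codes.length
  let masks : List (List Char) :=
    [1,2,4,8].foldl (fun acc h => if R < h then acc else
      [1,2,4,8].foldl (fun acc w => if C < w then acc else
        (List.range R).foldl (fun acc r =>
          (List.range C).foldl (fun acc c =>
            if !(isValidRect val_map target row_codes col_codes h w r c) then acc
            else if 2*h ≤ 8 && 2*h ≤ R && (List.range (h+1)).any (fun d =>
                -- (r - d) % R in Python; d ≤ h ≤ R here, so this is (r + R - d) % R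
                isValidRect val_map target row_codes col_codes (2*h) w ((r + R - d) % R) c)
              then acc
            else if 2*w ≤ 8 && 2*w ≤ C && (List.range (w+1)).any (fun d =>
                isValidRect val_map target row_codes col_codes h (2*w) r ((c + C - d) % C))
              then acc
            else
              let cells := (List.range h).flatMap (fun i =>
                (List.range w).map (fun j =>
                  row_codes.getD ((r + i) % R) [] ++ col_codes.getD ((c + j) % C) []))
              let mask := (PySem.List.enumerate (cells.headD []) 0).map (fun p =>
                if cells.all (fun cell => cell.getD p.1.toNat ' ' == p.2) then p.2 else '-')
              PySem.Set.add acc mask) acc) acc) acc) []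
  masks.map (fun m => String.mk m)

-- ===== PRECONDITION & SPEC =====
-- Pre_ excludes tables containing an empty row: there Python A (and B) raise
-- IndexError on row[-1].
def Pre_get_prime_implicants_karnaugh_map (table : List (List Int)) (is_dnf : Bool) : Prop :=
  ∀ row ∈ table, row ≠ []
instance (table : List (List Int)) (is_dnf : Bool) :
    Decidable (Pre_get_prime_implicants_karnaugh_map table is_dnf) := by
  unfold Pre_get_prime_implicants_karnaugh_map; infer_instance

def pvWitness_get_prime_implicants_karnaugh_map : List (List Int) × Bool :=
  ([[0, 0, 1], [0, 1, 1], [1, 0, 1], [1, 1, 0]], true)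

def Spec_get_prime_implicants_karnaugh_map (table : List (List Int)) (is_dnf : Bool) (out : List String) : Prop := out = get_prime_implicants_karnaugh_map_alt table is_dnf
instance (table : List (List Int)) (is_dnf : Bool) (out : List String) : Decidable (Spec_get_prime_implicants_karnaugh_map table is_dnf out) := by unfold Spec_get_prime_implicants_karnaugh_map; infer_instance

-- ===== CLAIM (what is proved, stated in full; the proofs are below) =====
def Claim_equal_get_prime_implicants_karnaugh_map : Prop := ∀ (table : List (List Int)) (is_dnf : Bool), Dom_get_prime_implicants_karnaugh_map table is_dnf → Pre_get_prime_implicants_karnaugh_map table is_dnf → Spec_get_prime_implicants_karnaugh_map table is_dnf (get_prime_implicants_karnaugh_map table is_dnf)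

-- ===== LEMMAS AND PROOFS =====

-- generic: a flatMap producing [g x] under a guard is filter-then-map
theorem pvFlatMap_if {α β : Type} (l : List α) (p : α → Bool) (g : α → β) :
    (l.flatMap (fun x => if p x then [g x] else [])) = (l.filter p).map g := by
  induction l with
  | nil => rfl
  | cons a t ih => simp only [List.flatMap_cons, List.filter_cons, ih]; split <;> simp

theorem gray_succ (b : Nat) :
    generate_gray_code (b + 1) =
      (generate_gray_code b).map (fun code => '0' :: code) ++
      (generate_gray_code b).reverse.map (fun code => '1' :: code) := by
  cases b with
  | zero => rfl
  | succ b => rfl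

theorem grayAlt_eq (b : Nat) : grayCodesAlt b = generate_gray_code b := by
  induction b with
  | zero => rfl
  | succ b ih =>
    unfold grayCodesAlt at *
    rw [List.range_succ, List.foldl_append, ih, List.foldl_cons, List.foldl_nil, gray_succ]

theorem gray_length (b : Nat) : (generate_gray_code b).length = 2 ^ b := by
  induction b with
  | zero => rfl
  | succ b ih => rw [gray_succ]; simp [ih, Nat.pow_succ]; omega

theorem gray_mem_length (b : Nat) : ∀ u ∈ generate_gray_code b, u.length = b := by
  induction b with
  | zero =>
    intro u hu
    rw [show generate_gray_code 0 = [[]] from rfl] at hu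
    simp at hu; simp [hu]
  | succ b ih =>
    intro u hu
    rw [gray_succ] at hu
    rcases List.mem_append.mp hu with h | h
    · obtain ⟨v, hv, rfl⟩ := List.mem_map.mp h
      simp [ih v hv]
    · obtain ⟨v, hv, rfl⟩ := List.mem_map.mp h
      simp only [List.mem_reverse] at hv
      simp [ih v hv]

theorem gray_nodup (b : Nat) : (generate_gray_code b).Nodup := by
  induction b with
  | zero => simp [generate_gray_code]
  | succ b ih =>
    rw [gray_succ]
    refine List.Nodup.append ?_ ?_ ?_
    · exact List.Nodup.map List.cons_injective ih
    · exact List.Nodup.map List.cons_injective (List.nodup_reverse.mpr ih)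
    · intro x hx hy
      obtain ⟨v, _, rfl⟩ := List.mem_map.mp hx
      obtain ⟨u, _, he⟩ := List.mem_map.mp hy
      injection he with h1 _
      exact absurd h1 (by decide)

-- ----- cells and arcs -----
def pvCell (rc cc : List (List Char)) (x y : Nat) : List Char := rc.getD x [] ++ cc.getD y []

def pvCells (rc cc : List (List Char)) (h w r c : Nat) : List (List Char) :=
  (List.range h).flatMap (fun i => (List.range w).map (fun j =>
    pvCell rc cc ((r + i) % rc.length) ((c + j) % cc.length)))

theorem grid_eq_pvCells (rc cc : List (List Char)) (r c h w : Nat) :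
    get_grid_cells rc cc r c h w = pvCells rc cc h w r c := rfl

theorem mem_pvCells {rc cc : List (List Char)} {h w r c : Nat} {x : List Char} :
    x ∈ pvCells rc cc h w r c ↔
      ∃ i < h, ∃ j < w, x = pvCell rc cc ((r + i) % rc.length) ((c + j) % cc.length) := by
  simp [pvCells, List.mem_flatMap, List.mem_map, eq_comm]

theorem pvCell_inj {rc cc : List (List Char)} {la lb : Nat}
    (hra : ∀ u ∈ rc, u.length = la) (hca : ∀ v ∈ cc, v.length = lb)
    (hrnd : rc.Nodup) (hcnd : cc.Nodup)
    {x y x' y' : Nat} (hx : x < rc.length) (hy : y < cc.length)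
    (hx' : x' < rc.length) (hy' : y' < cc.length)
    (he : pvCell rc cc x y = pvCell rc cc x' y') : x = x' ∧ y = y' := by
  unfold pvCell at he
  rw [List.getD_eq_getElem rc [] hx, List.getD_eq_getElem cc [] hy,
      List.getD_eq_getElem rc [] hx', List.getD_eq_getElem cc [] hy'] at he
  have hlen : (rc[x]).length = (rc[x']).length := by
    rw [hra _ (List.getElem_mem hx), hra _ (List.getElem_mem hx')]
  obtain ⟨h1, h2⟩ := List.append_inj he hlen
  exact ⟨(hrnd.getElem_inj_iff).mp h1, (hcnd.getElem_inj_iff).mp h2⟩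

def pvArc (R r h : Nat) : Finset Nat := (Finset.range h).image (fun i => (r + i) % R)

theorem mem_pvArc {R r h x : Nat} : x ∈ pvArc R r h ↔ ∃ i < h, (r + i) % R = x := by
  simp [pvArc]

theorem arc_idx_inj {R r h : Nat} (hhR : h ≤ R) {i i' : Nat} (hi : i < h) (hi' : i' < h)
    (he : (r + i) % R = (r + i') % R) : i = i' := by
  rcases Nat.le_total i i' with hle | hle
  · have hd : R ∣ (r + i') - (r + i) := (Nat.modEq_iff_dvd' (by omega)).mp he
    rcases Nat.eq_zero_or_pos ((r + i') - (r + i)) with h0 | hpos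
    · omega
    · have := Nat.le_of_dvd hpos hd; omega
  · have hd : R ∣ (r + i) - (r + i') := (Nat.modEq_iff_dvd' (by omega)).mp he.symm
    rcases Nat.eq_zero_or_pos ((r + i) - (r + i')) with h0 | hpos
    · omega
    · have := Nat.le_of_dvd hpos hd; omega

theorem arc_card {R r h : Nat} (hhR : h ≤ R) : (pvArc R r h).card = h := by
  unfold pvArc
  rw [Finset.card_image_of_injOn, Finset.card_range]
  intro i hi i' hi' he
  exact arc_idx_inj hhR (Finset.mem_range.mp hi) (Finset.mem_range.mp hi') he

theorem cells_subset_iff {rc cc : List (List Char)} {la lb : Nat}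
    (hra : ∀ u ∈ rc, u.length = la) (hca : ∀ v ∈ cc, v.length = lb)
    (hrnd : rc.Nodup) (hcnd : cc.Nodup) (hR : 0 < rc.length) (hC : 0 < cc.length)
    {h1 w1 r1 c1 h2 w2 r2 c2 : Nat} (hh1 : 0 < h1) (hw1 : 0 < w1) :
    (∀ x ∈ pvCells rc cc h1 w1 r1 c1, x ∈ pvCells rc cc h2 w2 r2 c2) ↔
      pvArc rc.length r1 h1 ⊆ pvArc rc.length r2 h2 ∧
      pvArc cc.length c1 w1 ⊆ pvArc cc.length c2 w2 := by
  constructor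
  · intro hsub
    constructor
    · intro x hx
      obtain ⟨i, hi, hix⟩ := mem_pvArc.mp hx
      have hm : pvCell rc cc ((r1+i) % rc.length) ((c1+0) % cc.length) ∈ pvCells rc cc h1 w1 r1 c1 :=
        mem_pvCells.mpr ⟨i, hi, 0, hw1, rfl⟩
      obtain ⟨i', hi', j', hj', he⟩ := mem_pvCells.mp (hsub _ hm)
      obtain ⟨h1', _⟩ := pvCell_inj hra hca hrnd hcnd
        (Nat.mod_lt _ hR) (Nat.mod_lt _ hC) (Nat.mod_lt _ hR) (Nat.mod_lt _ hC) he
      exact mem_pvArc.mpr ⟨i', hi', by omega⟩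
    · intro y hy
      obtain ⟨j, hj, hjy⟩ := mem_pvArc.mp hy
      have hm : pvCell rc cc ((r1+0) % rc.length) ((c1+j) % cc.length) ∈ pvCells rc cc h1 w1 r1 c1 :=
        mem_pvCells.mpr ⟨0, hh1, j, hj, rfl⟩
      obtain ⟨i', hi', j', hj', he⟩ := mem_pvCells.mp (hsub _ hm)
      obtain ⟨_, h2'⟩ := pvCell_inj hra hca hrnd hcnd
        (Nat.mod_lt _ hR) (Nat.mod_lt _ hC) (Nat.mod_lt _ hR) (Nat.mod_lt _ hC) he
      exact mem_pvArc.mpr ⟨j', hj', by omega⟩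
  · rintro ⟨hrow, hcol⟩ x hx
    obtain ⟨i, hi, j, hj, rfl⟩ := mem_pvCells.mp hx
    obtain ⟨i', hi', hie⟩ := mem_pvArc.mp (hrow (mem_pvArc.mpr ⟨i, hi, rfl⟩))
    obtain ⟨j', hj', hje⟩ := mem_pvArc.mp (hcol (mem_pvArc.mpr ⟨j, hj, rfl⟩))
    exact mem_pvCells.mpr ⟨i', hi', j', hj', by rw [hie, hje]⟩

-- ----- arc covering: the combinatorial heart of the equivalence -----
theorem pvmod_shift {R q : Nat} (hq : q ≤ R) (a : Nat) :
    (a % R + R - q) % R = (a + R - q) % R := by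
  rw [show a % R + R - q = a % R + (R - q) by omega,
      show a + R - q = a + (R - q) by omega, Nat.mod_add_mod]

theorem mem_arc_iff_frame {R r2 h2 x : Nat} (hh2 : h2 ≤ R) (hx : x < R) :
    x ∈ pvArc R r2 h2 ↔ (x + R - r2 % R) % R < h2 := by
  have hR : 0 < R := by omega
  have hq : r2 % R < R := Nat.mod_lt _ hR
  constructor
  · intro hm
    obtain ⟨i, hi, he⟩ := mem_pvArc.mp hm
    have hx2 : (x + R - r2 % R) % R = (r2 + i + R - r2 % R) % R := by
      rw [← he, pvmod_shift (le_of_lt hq)]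
    have h0 := Nat.mod_add_div r2 R
    have hkey : r2 + i + R - r2 % R = i + R * (r2 / R + 1) := by
      rw [Nat.mul_add, Nat.mul_one]; omega
    rw [hx2, hkey, Nat.add_mul_mod_self_left, Nat.mod_eq_of_lt (by omega)]
    exact hi
  · intro hf
    refine mem_pvArc.mpr ⟨(x + R - r2 % R) % R, hf, ?_⟩
    rw [← Nat.mod_add_mod, Nat.add_mod_mod,
        show r2 % R + (x + R - r2 % R) = x + R by omega, Nat.add_mod_right]
    exact Nat.mod_eq_of_lt hx

theorem pvArc_lt {R r h x : Nat} (hR : 0 < R) (hx : x ∈ pvArc R r h) : x < R := by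
  obtain ⟨i, _, he⟩ := mem_pvArc.mp hx
  exact he ▸ Nat.mod_lt _ hR

-- a rectangle arc is inside each of its doubled arcs
theorem arc_sub_doubled {R r h d : Nat} (hR : 0 < R) (hd : d ≤ h) (hhR : h ≤ R) :
    pvArc R r h ⊆ pvArc R ((r + R - d) % R) (2 * h) := by
  intro x hx
  obtain ⟨i, hi, he⟩ := mem_pvArc.mp hx
  refine mem_pvArc.mpr ⟨d + i, by omega, ?_⟩
  rw [Nat.mod_add_mod, show r + R - d + (d + i) = r + i + R by omega, Nat.add_mod_right]
  exact he

-- powers of two: a strictly smaller one is at most half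
theorem pvpow_half {x y u v : Nat} (hx : x = 2 ^ u) (hy : y = 2 ^ v) (hlt : x < y) :
    2 * x ≤ y := by
  subst hx hy
  have huv : u < v := by
    by_contra hc
    have hle : (2:Nat) ^ v ≤ 2 ^ u := Nat.pow_le_pow_right (by omega) (by omega)
    omega
  calc 2 * 2 ^ u = 2 ^ (u + 1) := by ring
  _ ≤ 2 ^ v := Nat.pow_le_pow_right (by omega) (by omega)

-- an arc strictly inside a longer valid arc lies inside some doubled arc of itself
theorem arc_cover {R r r2 h h2 : Nat} {e u v : Nat}
    (hRe : R = 2 ^ e) (hhu : h = 2 ^ u) (hh2v : h2 = 2 ^ v)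
    (hsub : pvArc R r h ⊆ pvArc R r2 h2) (hlt : h < h2) (hh2R : h2 ≤ R) :
    ∃ d ≤ h, pvArc R ((r + R - d) % R) (2 * h) ⊆ pvArc R r2 h2 := by
  have hR : 0 < R := hRe ▸ Nat.two_pow_pos e
  have h2h : 2 * h ≤ h2 := pvpow_half hhu hh2v hlt
  have hhpos : 0 < h := hhu ▸ Nat.two_pow_pos u
  have hh2pos : 0 < h2 := hh2v ▸ Nat.two_pow_pos v
  obtain ⟨q, hqlt, hqe⟩ : ∃ q, q < R ∧ r2 % R = q := ⟨_, Nat.mod_lt _ hR, rfl⟩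
  have hmemiff : ∀ x, x < R → (x ∈ pvArc R r2 h2 ↔ (x + R - q) % R < h2) := by
    intro x hx; rw [mem_arc_iff_frame hh2R hx, hqe]
  obtain ⟨p, hplt, hpe⟩ : ∃ p, p < R ∧ (r + R - q) % R = p := ⟨_, Nat.mod_lt _ hR, rfl⟩
  have hframe : ∀ i, ((r + i) % R + R - q) % R = (p + i) % R := by
    intro i
    rw [pvmod_shift (le_of_lt hqlt) (r + i),
        show r + i + R - q = (r + R - q) + i by omega, ← Nat.mod_add_mod, hpe]
  have hmem : ∀ i, i < h → (p + i) % R < h2 := by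
    intro i hi
    have hx := hsub (mem_pvArc.mpr ⟨i, hi, rfl⟩)
    have hfx := (hmemiff _ (pvArc_lt hR hx)).mp hx
    rwa [hframe i] at hfx
  have hp0 : p < h2 := by
    have h00 := hmem 0 (by omega)
    rwa [Nat.add_zero, Nat.mod_eq_of_lt hplt] at h00
  rcases eq_or_lt_of_le hh2R with hfull | hh2R'
  · refine ⟨0, by omega, fun x hx => (hmemiff _ (pvArc_lt hR hx)).mpr ?_⟩
    rw [hfull]
    exact Nat.mod_lt _ hR
  · have h2R : 2 * h2 ≤ R := pvpow_half hh2v hRe hh2R'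
    have hnowrap : p + h ≤ h2 := by
      rcases Nat.lt_or_ge (p + h) R with hlt2 | hge
      · have hlast := hmem (h - 1) (by omega)
        rw [Nat.mod_eq_of_lt (by omega)] at hlast
        omega
      · omega
    refine ⟨min p h, by omega, fun x hx => ?_⟩
    obtain ⟨i', hi', he⟩ := mem_pvArc.mp hx
    refine (hmemiff _ (pvArc_lt hR hx)).mpr ?_
    rw [← he, Nat.mod_add_mod, pvmod_shift (le_of_lt hqlt),
        show r + R - min p h + i' + R - q = (r + R - q) + (R - min p h + i') by omega,
        ← Nat.mod_add_mod, hpe,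
        show p + (R - min p h + i') = (p - min p h + i') + R by omega,
        Nat.add_mod_right, Nat.mod_eq_of_lt (by omega)]
    omega

-- ----- validity and sizes -----
def pvPred (vm : PySem.Dict (List Char) Int) (tgt : Int) (cell : List Char) : Bool :=
  vm.getD cell (-1) == tgt

def pvValid (vm : PySem.Dict (List Char) Int) (tgt : Int) (rc cc : List (List Char))
    (h w r c : Nat) : Bool :=
  (pvCells rc cc h w r c).all (pvPred vm tgt)

theorem isValidRect_eq (vm : PySem.Dict (List Char) Int) (tgt : Int)
    (rc cc : List (List Char)) (h w r c : Nat) :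
    isValidRect vm tgt rc cc h w r c = pvValid vm tgt rc cc h w r c := by
  refine Bool.coe_iff_coe.mp ?_
  simp only [isValidRect, pvValid, List.all_eq_true, List.mem_range]
  constructor
  · intro hall x hx
    obtain ⟨i, hi, j, hj, rfl⟩ := mem_pvCells.mp hx
    simpa [pvCell, pvPred] using hall i hi j hj
  · intro hall i hi j hj
    simpa [pvCell, pvPred] using hall _ (mem_pvCells.mpr ⟨i, hi, j, hj, rfl⟩)

theorem pvValid_mono (vm : PySem.Dict (List Char) Int) (tgt : Int)
    (rc cc : List (List Char)) {h w r c h2 w2 r2 c2 : Nat}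
    (hsub : ∀ x ∈ pvCells rc cc h w r c, x ∈ pvCells rc cc h2 w2 r2 c2)
    (hv : pvValid vm tgt rc cc h2 w2 r2 c2 = true) :
    pvValid vm tgt rc cc h w r c = true := by
  rw [pvValid, List.all_eq_true] at hv ⊢
  exact fun x hx => hv x (hsub x hx)

theorem pvsize_pow {x : Nat} (hx : x ∈ ([1,2,4,8] : List Nat)) : ∃ u, x = 2 ^ u := by
  fin_cases hx
  exacts [⟨0, rfl⟩, ⟨1, rfl⟩, ⟨2, rfl⟩, ⟨3, rfl⟩]

theorem pvsize_pos {x : Nat} (hx : x ∈ ([1,2,4,8] : List Nat)) : 0 < x := by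
  fin_cases hx <;> decide

theorem pvsize_le8 {x : Nat} (hx : x ∈ ([1,2,4,8] : List Nat)) : x ≤ 8 := by
  fin_cases hx <;> decide

theorem pvsize_double {x : Nat} (hx : x ∈ ([1,2,4,8] : List Nat)) (h8 : 2 * x ≤ 8) :
    2 * x ∈ ([1,2,4,8] : List Nat) := by
  fin_cases hx <;> simp_all <;> decide

-- ----- the key-level primality equivalence -----
theorem prime_key_iff (vm : PySem.Dict (List Char) Int) (tgt : Int) (av bv : Nat)
    (rc cc : List (List Char)) (hrc : rc = generate_gray_code av)
    (hcc : cc = generate_gray_code bv) {h w r c : Nat}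
    (hs : h ∈ ([1,2,4,8] : List Nat)) (ws : w ∈ ([1,2,4,8] : List Nat))
    (hhR : h ≤ rc.length) (hwC : w ≤ cc.length) (hr : r < rc.length) (hc : c < cc.length) :
    (∃ h2 w2 r2 c2,
        (h2 ∈ ([1,2,4,8] : List Nat) ∧ w2 ∈ ([1,2,4,8] : List Nat) ∧
         h2 ≤ rc.length ∧ w2 ≤ cc.length ∧ r2 < rc.length ∧ c2 < cc.length) ∧
        pvValid vm tgt rc cc h2 w2 r2 c2 = true ∧
        (∀ x ∈ pvCells rc cc h w r c, x ∈ pvCells rc cc h2 w2 r2 c2) ∧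
        ¬ (∀ x ∈ pvCells rc cc h2 w2 r2 c2, x ∈ pvCells rc cc h w r c))
    ↔
    ((2*h ≤ 8 ∧ 2*h ≤ rc.length ∧ ∃ d ≤ h,
        pvValid vm tgt rc cc (2*h) w ((r + rc.length - d) % rc.length) c = true) ∨
     (2*w ≤ 8 ∧ 2*w ≤ cc.length ∧ ∃ d ≤ w,
        pvValid vm tgt rc cc h (2*w) r ((c + cc.length - d) % cc.length) = true)) := by
  have hra : ∀ u ∈ rc, u.length = av := by rw [hrc]; exact gray_mem_length av
  have hca : ∀ v' ∈ cc, v'.length = bv := by rw [hcc]; exact gray_mem_length bv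
  have hrnd : rc.Nodup := by rw [hrc]; exact gray_nodup av
  have hcnd : cc.Nodup := by rw [hcc]; exact gray_nodup bv
  have hRe : rc.length = 2 ^ av := by rw [hrc]; exact gray_length av
  have hCe : cc.length = 2 ^ bv := by rw [hcc]; exact gray_length bv
  have hR : 0 < rc.length := by rw [hRe]; exact Nat.two_pow_pos av
  have hC : 0 < cc.length := by rw [hCe]; exact Nat.two_pow_pos bv
  have hh0 : 0 < h := pvsize_pos hs
  have hw0 : 0 < w := pvsize_pos ws
  obtain ⟨u, hu⟩ := pvsize_pow hs
  obtain ⟨uw, huw⟩ := pvsize_pow ws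
  constructor
  · -- A-nonprime ⇒ a doubled valid rectangle
    rintro ⟨h2, w2, r2, c2, ⟨hs2, ws2, hh2R, hw2C, _, _⟩, hv2, hsub, hnsub⟩
    have hh20 : 0 < h2 := pvsize_pos hs2
    have hw20 : 0 < w2 := pvsize_pos ws2
    obtain ⟨v, hv'⟩ := pvsize_pow hs2
    obtain ⟨vw, hvw⟩ := pvsize_pow ws2
    obtain ⟨hrowsub, hcolsub⟩ :=
      (cells_subset_iff hra hca hrnd hcnd hR hC hh0 hw0).mp hsub
    have hnsub2 : ¬ (pvArc rc.length r2 h2 ⊆ pvArc rc.length r h ∧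
        pvArc cc.length c2 w2 ⊆ pvArc cc.length c w) := by
      intro hcon
      exact hnsub ((cells_subset_iff hra hca hrnd hcnd hR hC hh20 hw20).mpr hcon)
    by_cases hrcase : pvArc rc.length r2 h2 ⊆ pvArc rc.length r h
    · -- rows equal as sets; columns strictly grow
      have hccase : ¬ pvArc cc.length c2 w2 ⊆ pvArc cc.length c w := fun hcon =>
        hnsub2 ⟨hrcase, hcon⟩
      have hss : pvArc cc.length c w ⊂ pvArc cc.length c2 w2 :=
        ssubset_iff_subset_not_subset.mpr ⟨hcolsub, hccase⟩
      have hlt : w < w2 := by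
        have := Finset.card_lt_card hss
        rwa [arc_card hwC, arc_card hw2C] at this
      obtain ⟨d, hd, hdsub⟩ := arc_cover hCe huw hvw hcolsub hlt hw2C
      have h2w2 : 2 * w ≤ w2 := pvpow_half huw hvw hlt
      refine Or.inr ⟨by have := pvsize_le8 ws2; omega, by omega, d, hd, ?_⟩
      refine pvValid_mono vm tgt rc cc ?_ hv2
      refine (cells_subset_iff hra hca hrnd hcnd hR hC hh0 (by omega)).mpr ⟨?_, hdsub⟩
      exact fun x hx => hrowsub hx
    · -- rows strictly grow
      have hss : pvArc rc.length r h ⊂ pvArc rc.length r2 h2 :=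
        ssubset_iff_subset_not_subset.mpr ⟨hrowsub, hrcase⟩
      have hlt : h < h2 := by
        have := Finset.card_lt_card hss
        rwa [arc_card hhR, arc_card hh2R] at this
      obtain ⟨d, hd, hdsub⟩ := arc_cover hRe hu hv' hrowsub hlt hh2R
      have h2h2 : 2 * h ≤ h2 := pvpow_half hu hv' hlt
      refine Or.inl ⟨by have := pvsize_le8 hs2; omega, by omega, d, hd, ?_⟩
      refine pvValid_mono vm tgt rc cc ?_ hv2
      refine (cells_subset_iff hra hca hrnd hcnd hR hC (by omega) hw0).mpr ⟨hdsub, ?_⟩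
      exact fun y hy => hcolsub hy
  · -- a doubled valid rectangle ⇒ A-nonprime
    rintro (⟨h8, h2R, d, hd, hvd⟩ | ⟨w8, w2C, d, hd, hvd⟩)
    · refine ⟨2*h, w, (r + rc.length - d) % rc.length, c,
        ⟨pvsize_double hs h8, ws, h2R, hwC, Nat.mod_lt _ hR, hc⟩, hvd, ?_, ?_⟩
      · refine (cells_subset_iff hra hca hrnd hcnd hR hC hh0 hw0).mpr
          ⟨arc_sub_doubled hR hd hhR, fun y hy => hy⟩
      · intro hcon
        obtain ⟨hr2, _⟩ :=
          (cells_subset_iff hra hca hrnd hcnd hR hC (by omega) hw0).mp hcon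
        have hsub2 := Finset.card_le_card hr2
        rw [arc_card h2R, arc_card hhR] at hsub2
        omega
    · refine ⟨h, 2*w, r, (c + cc.length - d) % cc.length,
        ⟨hs, pvsize_double ws w8, hhR, w2C, hr, Nat.mod_lt _ hC⟩, hvd, ?_, ?_⟩
      · refine (cells_subset_iff hra hca hrnd hcnd hR hC hh0 hw0).mpr
          ⟨fun y hy => hy, arc_sub_doubled hC hd hwC⟩
      · intro hcon
        obtain ⟨_, hc2⟩ :=
          (cells_subset_iff hra hca hrnd hcnd hR hC hh0 (by omega)).mp hcon
        have hsub2 := Finset.card_le_card hc2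
        rw [arc_card w2C, arc_card hwC] at hsub2
        omega

-- ----- enumeration order: both ports walk keys (h, w, r, c) in the same order -----
def pvKeys (R C : Nat) : List (Nat × Nat × Nat × Nat) :=
  [1,2,4,8].flatMap (fun h => if R < h then [] else
    [1,2,4,8].flatMap (fun w => if C < w then [] else
      (List.range R).flatMap (fun r => (List.range C).map (fun c => (h, w, r, c)))))

theorem mem_pvKeys {R C h w r c : Nat} :
    (h, w, r, c) ∈ pvKeys R C ↔
      h ∈ ([1,2,4,8] : List Nat) ∧ w ∈ ([1,2,4,8] : List Nat) ∧
      h ≤ R ∧ w ≤ C ∧ r < R ∧ c < C := by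
  simp only [pvKeys, List.mem_flatMap]
  constructor
  · rintro ⟨h', hh', hmem⟩
    split at hmem
    · simp at hmem
    · obtain ⟨w', hw', hmem⟩ := List.mem_flatMap.mp hmem
      split at hmem
      · simp at hmem
      · simp only [List.mem_flatMap, List.mem_range, List.mem_map, Prod.mk.injEq] at hmem
        obtain ⟨r', hr', c', hc', rfl, rfl, rfl, rfl⟩ := hmem
        exact ⟨hh', hw', by omega, by omega, hr', hc'⟩
  · rintro ⟨hh, hw, hhR, hwC, hr, hc⟩
    refine ⟨h, hh, ?_⟩
    rw [if_neg (by omega)]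
    refine List.mem_flatMap.mpr ⟨w, hw, ?_⟩
    rw [if_neg (by omega)]
    exact List.mem_flatMap.mpr ⟨r, List.mem_range.mpr hr,
      List.mem_map.mpr ⟨c, List.mem_range.mpr hc, rfl⟩⟩

theorem pvA_enum (R C : Nat) (P : Nat × Nat × Nat × Nat → Bool)
    (g : Nat × Nat × Nat × Nat → List (List Char)) :
    ([1,2,4,8].flatMap (fun h => if R < h then [] else
      [1,2,4,8].flatMap (fun w => if C < w then [] else
        (List.range R).flatMap (fun r => (List.range C).flatMap (fun c =>
          if P (h, w, r, c) then [g (h, w, r, c)] else [])))))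
    = ((pvKeys R C).filter P).map g := by
  unfold pvKeys
  rw [List.filter_flatMap, List.map_flatMap]
  congr 1
  funext h
  split
  · simp
  · rw [List.filter_flatMap, List.map_flatMap]
    congr 1
    funext w
    split
    · simp
    · rw [List.filter_flatMap, List.map_flatMap]
      congr 1
      funext r
      rw [List.filter_map, List.map_map, ← pvFlatMap_if]
      rfl

theorem pvFoldl_ite_nil {α β : Type} (c : Prop) [Decidable c] (l : List α)
    (g : β → α → β) (acc : β) :
    ((if c then ([] : List α) else l).foldl g acc) = if c then acc else l.foldl g acc := by
  split <;> rfl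

theorem pvB_foldStruct (R C : Nat) (b : List (List Char) → Nat × Nat × Nat × Nat → List (List Char))
    (init : List (List Char)) :
    [1,2,4,8].foldl (fun acc h => if R < h then acc else
      [1,2,4,8].foldl (fun acc w => if C < w then acc else
        (List.range R).foldl (fun acc r =>
          (List.range C).foldl (fun acc c => b acc (h, w, r, c)) acc) acc) acc) init
    = (pvKeys R C).foldl b init := by
  unfold pvKeys
  simp only [List.foldl_flatMap, pvFoldl_ite_nil, List.foldl_map]

-- a guarded Set.add loop is the deduped list of images of the kept elements
theorem pvFoldGuard {α : Type} (l : List α) (Q : α → Bool) (m : α → List Char) :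
    l.foldl (fun acc k => if Q k then PySem.Set.add acc (m k) else acc) []
      = PySem.Set.ofList ((l.filter Q).map m) := by
  rw [← List.foldl_filter, ← PySem.Set.update_map_eq_foldl_add,
    PySem.Set.update_nil_left]

-- ----- A's prime_rects loop: filter + first-occurrence dedup by set equality -----
theorem pvDedupFold (P : List (List Char) → Bool)
    (Req : List (List Char) → List (List Char) → Bool)
    (f : List (List Char) → List Char)
    (hRf : ∀ a b, Req a b = true → f a = f b) :
    ∀ (l seen : List (List (List Char))),
      (∀ x, (∃ p ∈ seen, Req p x = true) → f x ∈ seen.map f) →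
      PySem.Set.ofList ((l.foldl (fun acc rect =>
          if P rect && acc.all (fun p => !Req p rect) then acc ++ [rect] else acc) seen).map f)
        = PySem.Set.update (PySem.Set.ofList (seen.map f)) ((l.filter P).map f) := by
  intro l
  induction l with
  | nil => intro seen _; rfl
  | cons a t ih =>
    intro seen hinv
    rw [List.foldl_cons, List.filter_cons]
    by_cases hp : P a = true
    · rw [if_pos hp]
      by_cases hex : ∃ p ∈ seen, Req p a = true
      · have hall : seen.all (fun p => !Req p a) = false := by
          rw [List.all_eq_false]
          obtain ⟨p, hps, hpa⟩ := hex
          exact ⟨p, hps, by simp [hpa]⟩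
        rw [hp, hall, Bool.and_false, if_neg (by simp)]
        rw [ih seen hinv, List.map_cons]
        show _ = PySem.Set.update (PySem.Set.add _ (f a)) _
        have hfa : f a ∈ PySem.Set.ofList (seen.map f) :=
          (PySem.Set.mem_ofList _ _).mpr (hinv a hex)
        rw [show PySem.Set.add (PySem.Set.ofList (seen.map f)) (f a)
              = PySem.Set.ofList (seen.map f) by simp [PySem.Set.add, hfa]]
      · have hall : seen.all (fun p => !Req p a) = true := by
          rw [List.all_eq_true]
          intro p hps
          simp only [Bool.not_eq_true']
          by_contra hb
          exact hex ⟨p, hps, by simpa using hb⟩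
        rw [hp, hall, Bool.and_true, if_pos rfl]
        have hinv' : ∀ x, (∃ p ∈ seen ++ [a], Req p x = true) → f x ∈ (seen ++ [a]).map f := by
          rintro x ⟨p, hpm, hpx⟩
          rw [List.map_append]
          rcases List.mem_append.mp hpm with hin | hin
          · exact List.mem_append.mpr (Or.inl (hinv x ⟨p, hin, hpx⟩))
          · have hpa : p = a := by simpa using hin
            subst hpa
            have hfx : f x = f p := (hRf p x hpx).symm
            exact List.mem_append.mpr (Or.inr (by simp [hfx]))
        rw [ih (seen ++ [a]) hinv', List.map_cons, List.map_append,
          show List.map f [a] = [f a] from rfl, PySem.Set.ofList_append_singleton]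
        rfl
    · rw [if_neg hp, if_neg (by simp [hp])]
      exact ih seen hinv

-- ----- facts about one-element and two-element deduped lists -----
theorem pvListSingleton {α : Type} {l : List α} {g : α} (hnd : l.Nodup) (hne : g ∈ l)
    (hall : ∀ x ∈ l, x = g) : l = [g] := by
  cases l with
  | nil => simp at hne
  | cons a t =>
    have ha : a = g := hall a (by simp)
    subst ha
    cases t with
    | nil => rfl
    | cons b u =>
      have hb : b = a := hall b (by simp)
      subst hb
      simp at hnd

theorem pvLenNeOne {α : Type} {l : List α} {x y : α} (hx : x ∈ l) (hy : y ∈ l)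
    (hxy : x ≠ y) : l.length ≠ 1 := by
  cases l with
  | nil => simp at hx
  | cons a t =>
    cases t with
    | nil =>
      simp at hx hy
      exact absurd (hx.trans hy.symm) hxy
    | cons b u => simp

theorem pvBits_all {s : List (List Char)} {i : Nat} {g : Char}
    (hmem : ∃ y ∈ s, y.getD i ' ' = g) (hall : ∀ y ∈ s, y.getD i ' ' = g) :
    PySem.Set.ofList (s.map (fun cell => cell.getD i ' ')) = [g] := by
  refine pvListSingleton (PySem.Set.nodup_ofList _) ?_ ?_
  · obtain ⟨y, hy, hyg⟩ := hmem
    exact (PySem.Set.mem_ofList _ _).mpr (List.mem_map.mpr ⟨y, hy, hyg⟩)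
  · intro x hx
    obtain ⟨y, hy, rfl⟩ := List.mem_map.mp ((PySem.Set.mem_ofList _ _).mp hx)
    exact hall y hy

-- the single mask entry depends only on the SET of cells
theorem rect_to_mask_congr {s t : List (List Char)} (nv : Nat)
    (hmem : ∀ x, x ∈ s ↔ x ∈ t) : rect_to_mask s nv = rect_to_mask t nv := by
  unfold rect_to_mask
  refine List.map_congr_left ?_
  intro i _
  by_cases hc : ∃ g, (∃ y ∈ s, y.getD i ' ' = g) ∧ ∀ y ∈ s, y.getD i ' ' = g
  · obtain ⟨g, hg1, hg2⟩ := hc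
    have hg1t : ∃ y ∈ t, y.getD i ' ' = g := by
      obtain ⟨y, hy, hyg⟩ := hg1; exact ⟨y, (hmem y).mp hy, hyg⟩
    have hg2t : ∀ y ∈ t, y.getD i ' ' = g := fun y hy => hg2 y ((hmem y).mpr hy)
    rw [pvBits_all hg1 hg2, pvBits_all hg1t hg2t]
  · rcases List.eq_nil_or_concat s with hs0 | ⟨_, _, hss⟩
    · have ht0 : t = [] := by
        cases ht : t with
        | nil => rfl
        | cons b u =>
          exact absurd ((hmem b).mpr (by rw [ht]; simp)) (by rw [hs0]; simp)
      rw [hs0, ht0]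
    · have hsne : s ≠ [] := by rw [hss]; simp
      obtain ⟨y0, hy0⟩ := List.exists_mem_of_ne_nil s hsne
      have hc2 : ∃ y1 ∈ s, y1.getD i ' ' ≠ y0.getD i ' ' := by
        by_contra hb
        push_neg at hb
        exact hc ⟨y0.getD i ' ', ⟨y0, hy0, rfl⟩, hb⟩
      obtain ⟨y1, hy1, hne⟩ := hc2
      have hmem0s : y0.getD i ' ' ∈ PySem.Set.ofList (s.map (fun cell => cell.getD i ' ')) :=
        (PySem.Set.mem_ofList _ _).mpr (List.mem_map.mpr ⟨y0, hy0, rfl⟩)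
      have hmem1s : y1.getD i ' ' ∈ PySem.Set.ofList (s.map (fun cell => cell.getD i ' ')) :=
        (PySem.Set.mem_ofList _ _).mpr (List.mem_map.mpr ⟨y1, hy1, rfl⟩)
      have hmem0t : y0.getD i ' ' ∈ PySem.Set.ofList (t.map (fun cell => cell.getD i ' ')) :=
        (PySem.Set.mem_ofList _ _).mpr (List.mem_map.mpr ⟨y0, (hmem y0).mp hy0, rfl⟩)
      have hmem1t : y1.getD i ' ' ∈ PySem.Set.ofList (t.map (fun cell => cell.getD i ' ')) :=
        (PySem.Set.mem_ofList _ _).mpr (List.mem_map.mpr ⟨y1, (hmem y1).mp hy1, rfl⟩)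
      rw [if_neg (pvLenNeOne hmem1s hmem0s hne), if_neg (pvLenNeOne hmem1t hmem0t hne)]

theorem maskAB (rc cc : List (List Char)) {av bv : Nat}
    (hra : ∀ u ∈ rc, u.length = av) (hca : ∀ v ∈ cc, v.length = bv)
    (hR : 0 < rc.length) (hC : 0 < cc.length)
    {h w r c : Nat} (hh0 : 0 < h) (hw0 : 0 < w) :
    rect_to_mask (PySem.Set.ofList (pvCells rc cc h w r c)) (av + bv) =
      (PySem.List.enumerate ((pvCells rc cc h w r c).headD []) 0).map (fun p =>
        if (pvCells rc cc h w r c).all (fun cell => cell.getD p.1.toNat ' ' == p.2)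
        then p.2 else '-') := by
  have hlen : ∀ x ∈ pvCells rc cc h w r c, x.length = av + bv := by
    intro x hx
    obtain ⟨i, hi, j, hj, rfl⟩ := mem_pvCells.mp hx
    rw [pvCell, List.length_append,
        List.getD_eq_getElem rc [] (Nat.mod_lt _ hR),
        List.getD_eq_getElem cc [] (Nat.mod_lt _ hC),
        hra _ (List.getElem_mem _), hca _ (List.getElem_mem _)]
  have hmem0 : pvCell rc cc ((r + 0) % rc.length) ((c + 0) % cc.length) ∈
      pvCells rc cc h w r c := mem_pvCells.mpr ⟨0, hh0, 0, hw0, rfl⟩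
  have hne : pvCells rc cc h w r c ≠ [] := fun h0 => by rw [h0] at hmem0; simp at hmem0
  obtain ⟨c0, t, hct⟩ := List.exists_cons_of_ne_nil hne
  have hc0 : c0 ∈ pvCells rc cc h w r c := by rw [hct]; simp
  have hc0len : c0.length = av + bv := hlen c0 hc0
  have hhead : (pvCells rc cc h w r c).headD [] = c0 := by rw [hct]; rfl
  rw [hhead]
  apply List.ext_getElem
  · simp [rect_to_mask, PySem.List.length_enumerate, hc0len]
  · intro k hk1 hk2
    have hk : k < av + bv := by simpa [rect_to_mask] using hk1
    have hkc0 : k < c0.length := by omega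
    rw [show (rect_to_mask (PySem.Set.ofList (pvCells rc cc h w r c)) (av + bv))[k]'hk1 =
        (if (PySem.Set.ofList ((PySem.Set.ofList (pvCells rc cc h w r c)).map
              (fun cell => cell.getD k ' '))).length = 1
         then (PySem.Set.ofList ((PySem.Set.ofList (pvCells rc cc h w r c)).map
              (fun cell => cell.getD k ' '))).headD ' '
         else '-') by simp [rect_to_mask]]
    rw [List.getElem_map, PySem.List.getElem_enumerate]
    simp only [show ((0 : Int) + (k : Int)).toNat = k by simp,
      ← List.getD_eq_getElem c0 ' ' hkc0]
    by_cases hall : ∀ y ∈ pvCells rc cc h w r c, y.getD k ' ' = c0.getD k ' '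
    · have hbits : PySem.Set.ofList ((PySem.Set.ofList (pvCells rc cc h w r c)).map
          (fun cell => cell.getD k ' ')) = [c0.getD k ' '] :=
        pvBits_all ⟨c0, (PySem.Set.mem_ofList _ _).mpr hc0, rfl⟩
          (fun y hy => hall y ((PySem.Set.mem_ofList _ _).mp hy))
      rw [hbits, if_pos (by simp), if_pos (by
        rw [List.all_eq_true]
        intro cell hcell
        exact beq_iff_eq.mpr (hall cell hcell))]
      simp
    · push_neg at hall
      obtain ⟨y, hy, hyne⟩ := hall
      have hm1 : y.getD k ' ' ∈ PySem.Set.ofList ((PySem.Set.ofList (pvCells rc cc h w r c)).map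
          (fun cell => cell.getD k ' ')) :=
        (PySem.Set.mem_ofList _ _).mpr
          (List.mem_map.mpr ⟨y, (PySem.Set.mem_ofList _ _).mpr hy, rfl⟩)
      have hm0 : c0.getD k ' ' ∈ PySem.Set.ofList ((PySem.Set.ofList (pvCells rc cc h w r c)).map
          (fun cell => cell.getD k ' ')) :=
        (PySem.Set.mem_ofList _ _).mpr
          (List.mem_map.mpr ⟨c0, (PySem.Set.mem_ofList _ _).mpr hc0, rfl⟩)
      rw [if_neg (pvLenNeOne hm1 hm0 hyne)]
      rw [if_neg (by
        rw [Bool.not_eq_true, List.all_eq_false]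
        exact ⟨y, hy, by simpa using hyne⟩)]

theorem pvSetLe_iff (s t : List (List Char)) :
    pvSetLe (PySem.Set.ofList s) (PySem.Set.ofList t) = true ↔ ∀ x ∈ s, x ∈ t := by
  simp [pvSetLe, List.all_eq_true, PySem.Set.mem_ofList]

theorem pvSetEq_true_iff (s t : List (List Char)) :
    pvSetEq (PySem.Set.ofList s) (PySem.Set.ofList t) = true ↔
      (∀ x ∈ s, x ∈ t) ∧ (∀ x ∈ t, x ∈ s) := by
  rw [pvSetEq, Bool.and_eq_true, pvSetLe_iff, pvSetLe_iff]

-- A's inner scan over all valid rectangles agrees with B's doubled-rectangle checks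
theorem primeA_eq (vm : PySem.Dict (List Char) Int) (tgt : Int) (av bv : Nat)
    (rc cc : List (List Char)) (hrc : rc = generate_gray_code av)
    (hcc : cc = generate_gray_code bv) {h w r c : Nat}
    (hmemk : (h, w, r, c) ∈ pvKeys rc.length cc.length) :
    ((((pvKeys rc.length cc.length).filter
          (fun k => pvValid vm tgt rc cc k.1 k.2.1 k.2.2.1 k.2.2.2)).map
          (fun k => PySem.Set.ofList (pvCells rc cc k.1 k.2.1 k.2.2.1 k.2.2.2))).all
        (fun other => !(!pvSetEq (PySem.Set.ofList (pvCells rc cc h w r c)) other &&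
          pvSetLe (PySem.Set.ofList (pvCells rc cc h w r c)) other)))
    = (!(decide (2*h ≤ 8) && decide (2*h ≤ rc.length) &&
          (List.range (h+1)).any (fun d =>
            pvValid vm tgt rc cc (2*h) w ((r + rc.length - d) % rc.length) c)) &&
       !(decide (2*w ≤ 8) && decide (2*w ≤ cc.length) &&
          (List.range (w+1)).any (fun d =>
            pvValid vm tgt rc cc h (2*w) r ((c + cc.length - d) % cc.length)))) := by
  obtain ⟨hs, ws, hhR, hwC, hr, hc⟩ := mem_pvKeys.mp hmemk
  have hiff := prime_key_iff vm tgt av bv rc cc hrc hcc hs ws hhR hwC hr hc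
  have hA : ((((pvKeys rc.length cc.length).filter
          (fun k => pvValid vm tgt rc cc k.1 k.2.1 k.2.2.1 k.2.2.2)).map
          (fun k => PySem.Set.ofList (pvCells rc cc k.1 k.2.1 k.2.2.1 k.2.2.2))).all
        (fun other => !(!pvSetEq (PySem.Set.ofList (pvCells rc cc h w r c)) other &&
          pvSetLe (PySem.Set.ofList (pvCells rc cc h w r c)) other))) = true
      ↔ ¬ (∃ h2 w2 r2 c2,
        (h2 ∈ ([1,2,4,8] : List Nat) ∧ w2 ∈ ([1,2,4,8] : List Nat) ∧
         h2 ≤ rc.length ∧ w2 ≤ cc.length ∧ r2 < rc.length ∧ c2 < cc.length) ∧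
        pvValid vm tgt rc cc h2 w2 r2 c2 = true ∧
        (∀ x ∈ pvCells rc cc h w r c, x ∈ pvCells rc cc h2 w2 r2 c2) ∧
        ¬ (∀ x ∈ pvCells rc cc h2 w2 r2 c2, x ∈ pvCells rc cc h w r c)) := by
    rw [List.all_eq_true]
    constructor
    · rintro hall ⟨h2, w2, r2, c2, ⟨hs2, ws2, hh2, hw2, hr2, hc2⟩, hv2, hsub, hnsub⟩
      have hmem2 : PySem.Set.ofList (pvCells rc cc h2 w2 r2 c2) ∈
          ((pvKeys rc.length cc.length).filter
            (fun k => pvValid vm tgt rc cc k.1 k.2.1 k.2.2.1 k.2.2.2)).map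
            (fun k => PySem.Set.ofList (pvCells rc cc k.1 k.2.1 k.2.2.1 k.2.2.2)) := by
        refine List.mem_map.mpr ⟨(h2, w2, r2, c2), ?_, rfl⟩
        exact List.mem_filter.mpr
          ⟨mem_pvKeys.mpr ⟨hs2, ws2, hh2, hw2, hr2, hc2⟩, hv2⟩
      have := hall _ hmem2
      rw [Bool.not_eq_true', Bool.and_eq_false_iff] at this
      rcases this with he | hle
      · rw [Bool.not_eq_false', pvSetEq_true_iff] at he
        exact hnsub he.2
      · exact absurd ((pvSetLe_iff _ _).mpr hsub) (by simp [hle])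
    · intro hno other hother
      obtain ⟨k2, hk2f, rfl⟩ := List.mem_map.mp hother
      obtain ⟨hk2, hv2⟩ := List.mem_filter.mp hk2f
      obtain ⟨h2, w2, r2, c2⟩ := k2
      obtain ⟨hs2, ws2, hh2, hw2, hr2, hc2⟩ := mem_pvKeys.mp hk2
      rw [Bool.not_eq_true', Bool.and_eq_false_iff]
      by_cases hle : pvSetLe (PySem.Set.ofList (pvCells rc cc h w r c))
          (PySem.Set.ofList (pvCells rc cc h2 w2 r2 c2)) = true
      · left
        rw [Bool.not_eq_false', pvSetEq_true_iff]
        rw [pvSetLe_iff] at hle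
        refine ⟨hle, ?_⟩
        by_contra hnsup
        exact hno ⟨h2, w2, r2, c2, ⟨hs2, ws2, hh2, hw2, hr2, hc2⟩, hv2, hle, hnsup⟩
      · right
        exact Bool.not_eq_true _ ▸ (by simpa using hle)
  have hB : (!(decide (2*h ≤ 8) && decide (2*h ≤ rc.length) &&
          (List.range (h+1)).any (fun d =>
            pvValid vm tgt rc cc (2*h) w ((r + rc.length - d) % rc.length) c)) &&
       !(decide (2*w ≤ 8) && decide (2*w ≤ cc.length) &&
          (List.range (w+1)).any (fun d =>
            pvValid vm tgt rc cc h (2*w) r ((c + cc.length - d) % cc.length)))) = true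
      ↔ ¬ ((2*h ≤ 8 ∧ 2*h ≤ rc.length ∧ ∃ d ≤ h,
            pvValid vm tgt rc cc (2*h) w ((r + rc.length - d) % rc.length) c = true) ∨
           (2*w ≤ 8 ∧ 2*w ≤ cc.length ∧ ∃ d ≤ w,
            pvValid vm tgt rc cc h (2*w) r ((c + cc.length - d) % cc.length) = true)) := by
    constructor
    · intro htrue
      rw [Bool.and_eq_true] at htrue
      obtain ⟨ha, hb⟩ := htrue
      rw [Bool.not_eq_true'] at ha hb
      rintro (⟨h1, h2', d, hd, hv⟩ | ⟨h1, h2', d, hd, hv⟩)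
      · have hT : (decide (2*h ≤ 8) && decide (2*h ≤ rc.length) &&
            (List.range (h+1)).any (fun d =>
              pvValid vm tgt rc cc (2*h) w ((r + rc.length - d) % rc.length) c)) = true := by
          rw [Bool.and_eq_true, Bool.and_eq_true]
          exact ⟨⟨decide_eq_true h1, decide_eq_true h2'⟩,
            List.any_eq_true.mpr ⟨d, List.mem_range.mpr (by omega), hv⟩⟩
        rw [ha] at hT
        exact Bool.false_ne_true hT
      · have hT : (decide (2*w ≤ 8) && decide (2*w ≤ cc.length) &&
            (List.range (w+1)).any (fun d =>
              pvValid vm tgt rc cc h (2*w) r ((c + cc.length - d) % cc.length))) = true := by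
          rw [Bool.and_eq_true, Bool.and_eq_true]
          exact ⟨⟨decide_eq_true h1, decide_eq_true h2'⟩,
            List.any_eq_true.mpr ⟨d, List.mem_range.mpr (by omega), hv⟩⟩
        rw [hb] at hT
        exact Bool.false_ne_true hT
    · intro hno
      rw [Bool.and_eq_true]
      constructor <;> rw [Bool.not_eq_true']
      · cases hrow : (decide (2*h ≤ 8) && decide (2*h ≤ rc.length) &&
            (List.range (h+1)).any (fun d =>
              pvValid vm tgt rc cc (2*h) w ((r + rc.length - d) % rc.length) c)) with
        | false => rfl
        | true =>
          exfalso
          rw [Bool.and_eq_true, Bool.and_eq_true] at hrow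
          obtain ⟨⟨hd1, hd2⟩, hany⟩ := hrow
          obtain ⟨d, hdm, hv⟩ := List.any_eq_true.mp hany
          exact hno (Or.inl ⟨of_decide_eq_true hd1, of_decide_eq_true hd2, d,
            by have := List.mem_range.mp hdm; omega, hv⟩)
      · cases hcol : (decide (2*w ≤ 8) && decide (2*w ≤ cc.length) &&
            (List.range (w+1)).any (fun d =>
              pvValid vm tgt rc cc h (2*w) r ((c + cc.length - d) % cc.length))) with
        | false => rfl
        | true =>
          exfalso
          rw [Bool.and_eq_true, Bool.and_eq_true] at hcol
          obtain ⟨⟨hd1, hd2⟩, hany⟩ := hcol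
          obtain ⟨d, hdm, hv⟩ := List.any_eq_true.mp hany
          exact hno (Or.inr ⟨of_decide_eq_true hd1, of_decide_eq_true hd2, d,
            by have := List.mem_range.mp hdm; omega, hv⟩)
  refine Bool.coe_iff_coe.mp ?_
  rw [hA, hB]
  exact not_congr hiff

-- ----- folding the literal port terms into canonical names -----
theorem pvCells_fold (rc cc : List (List Char)) (h w r c : Nat) :
    (List.range h).flatMap (fun i => (List.range w).map (fun j =>
      rc.getD ((r + i) % rc.length) [] ++ cc.getD ((c + j) % cc.length) []))
    = pvCells rc cc h w r c := rfl

def pvChkRow (vm : PySem.Dict (List Char) Int) (tgt : Int) (rc cc : List (List Char))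
    (h w r c : Nat) : Bool :=
  decide (2*h ≤ 8) && decide (2*h ≤ rc.length) && ((List.range (h+1)).any fun d =>
    isValidRect vm tgt rc cc (2*h) w ((r + rc.length - d) % rc.length) c)

def pvChkCol (vm : PySem.Dict (List Char) Int) (tgt : Int) (rc cc : List (List Char))
    (h w r c : Nat) : Bool :=
  decide (2*w ≤ 8) && decide (2*w ≤ cc.length) && ((List.range (w+1)).any fun d =>
    isValidRect vm tgt rc cc h (2*w) r ((c + cc.length - d) % cc.length))

def pvQB (vm : PySem.Dict (List Char) Int) (tgt : Int) (rc cc : List (List Char))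
    (h w r c : Nat) : Bool :=
  isValidRect vm tgt rc cc h w r c && !pvChkRow vm tgt rc cc h w r c &&
    !pvChkCol vm tgt rc cc h w r c

def pvMaskB (rc cc : List (List Char)) (h w r c : Nat) : List Char :=
  (PySem.List.enumerate ((pvCells rc cc h w r c).headD []) 0).map (fun p =>
    if (pvCells rc cc h w r c).all (fun cell => cell.getD p.1.toNat ' ' == p.2)
    then p.2 else '-')

theorem pvChkRow_fold (vm : PySem.Dict (List Char) Int) (tgt : Int)
    (rc cc : List (List Char)) (h w r c : Nat) :
    (decide (2*h ≤ 8) && decide (2*h ≤ rc.length) && ((List.range (h+1)).any fun d =>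
      isValidRect vm tgt rc cc (2*h) w ((r + rc.length - d) % rc.length) c))
    = pvChkRow vm tgt rc cc h w r c := rfl

theorem pvChkCol_fold (vm : PySem.Dict (List Char) Int) (tgt : Int)
    (rc cc : List (List Char)) (h w r c : Nat) :
    (decide (2*w ≤ 8) && decide (2*w ≤ cc.length) && ((List.range (w+1)).any fun d =>
      isValidRect vm tgt rc cc h (2*w) r ((c + cc.length - d) % cc.length)))
    = pvChkCol vm tgt rc cc h w r c := rfl

theorem pvMaskB_fold (rc cc : List (List Char)) (h w r c : Nat) :
    ((PySem.List.enumerate ((pvCells rc cc h w r c).headD []) 0).map (fun p =>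
      if (pvCells rc cc h w r c).all (fun cell => cell.getD p.1.toNat ' ' == p.2)
      then p.2 else '-'))
    = pvMaskB rc cc h w r c := rfl

theorem pvQB_fold (vm : PySem.Dict (List Char) Int) (tgt : Int)
    (rc cc : List (List Char)) (h w r c : Nat) :
    (isValidRect vm tgt rc cc h w r c && !pvChkRow vm tgt rc cc h w r c &&
      !pvChkCol vm tgt rc cc h w r c) = pvQB vm tgt rc cc h w r c := rfl

theorem pvIfChain {α : Type} (v c1 c2 : Bool) (acc x : α) :
    (if (!v) = true then acc else if c1 = true then acc
     else if c2 = true then acc else x)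
    = if (v && !c1 && !c2) = true then x else acc := by
  cases v <;> cases c1 <;> cases c2 <;> simp

theorem pvValid_fold (vm : PySem.Dict (List Char) Int) (tgt : Int)
    (rc cc : List (List Char)) (h w r c : Nat) :
    ((pvCells rc cc h w r c).all fun cell => vm.getD cell (-1) == tgt)
      = pvValid vm tgt rc cc h w r c := rfl

-- A's rectangle enumeration, canonically
theorem pvA_enum2 (vm : PySem.Dict (List Char) Int) (tgt : Int)
    (rc cc : List (List Char)) :
    ([1,2,4,8] : List Nat).flatMap (fun h => if rc.length < h then [] else
      ([1,2,4,8] : List Nat).flatMap (fun w => if cc.length < w then [] else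
        (List.range rc.length).flatMap (fun r =>
          (List.range cc.length).flatMap (fun c =>
            if pvValid vm tgt rc cc h w r c = true
            then [PySem.Set.ofList (pvCells rc cc h w r c)] else []))))
    = ((pvKeys rc.length cc.length).filter
        (fun k => pvValid vm tgt rc cc k.1 k.2.1 k.2.2.1 k.2.2.2)).map
        (fun k => PySem.Set.ofList (pvCells rc cc k.1 k.2.1 k.2.2.1 k.2.2.2)) :=
  pvA_enum rc.length cc.length
    (fun k => pvValid vm tgt rc cc k.1 k.2.1 k.2.2.1 k.2.2.2)
    (fun k => PySem.Set.ofList (pvCells rc cc k.1 k.2.1 k.2.2.1 k.2.2.2))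

-- raw set inclusion / equality readings
theorem pvSetLe_iff' (s t : List (List Char)) :
    pvSetLe s t = true ↔ ∀ x ∈ s, x ∈ t := by
  simp [pvSetLe, List.all_eq_true]

theorem pvSetEq_true_iff' (s t : List (List Char)) :
    pvSetEq s t = true ↔ ((∀ x ∈ s, x ∈ t) ∧ (∀ x ∈ t, x ∈ s)) := by
  rw [pvSetEq, Bool.and_eq_true, pvSetLe_iff', pvSetLe_iff']

-- A's prime_rects pipeline collapses to a filter (masks are dedupped later anyway)
theorem pvAfold (nv : Nat) (l : List (List (List Char))) :
    PySem.Set.ofList (List.map (fun rect => rect_to_mask rect nv)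
      (List.foldl (fun prime_rects rect =>
        if ((l.all fun other => !(!pvSetEq rect other && pvSetLe rect other)) &&
            prime_rects.all fun p => !pvSetEq p rect) = true
        then prime_rects ++ [rect] else prime_rects) [] l))
    = PySem.Set.ofList ((l.filter (fun rect =>
        l.all fun other => !(!pvSetEq rect other && pvSetLe rect other))).map
        (fun rect => rect_to_mask rect nv)) := by
  have hRf : ∀ a b : List (List Char), pvSetEq a b = true →
      rect_to_mask a nv = rect_to_mask b nv := by
    intro a b hab
    obtain ⟨h1, h2⟩ := (pvSetEq_true_iff' a b).mp hab
    exact rect_to_mask_congr nv (fun x => ⟨fun hx => h1 x hx, fun hx => h2 x hx⟩)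
  refine Eq.trans (pvDedupFold _ _ _ hRf l []
    (by rintro x ⟨p, hp, _⟩; simp at hp)) ?_
  rw [show List.map (fun rect => rect_to_mask rect nv) ([] : List (List (List Char)))
      = [] from rfl,
    show PySem.Set.ofList ([] : List (List Char)) = [] from rfl,
    PySem.Set.update_nil_left]

-- B's nested loops collapse to a filtered, deduped mask list over the same keys
theorem pvBmasks (vm : PySem.Dict (List Char) Int) (tgt : Int)
    (rc cc : List (List Char)) :
    ([1,2,4,8] : List Nat).foldl (fun acc h => if rc.length < h then acc else
      ([1,2,4,8] : List Nat).foldl (fun acc w => if cc.length < w then acc else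
        (List.range rc.length).foldl (fun acc r =>
          (List.range cc.length).foldl (fun acc c =>
            if pvQB vm tgt rc cc h w r c = true
            then PySem.Set.add acc (pvMaskB rc cc h w r c) else acc) acc) acc) acc) []
    = PySem.Set.ofList (((pvKeys rc.length cc.length).filter
        (fun k => pvQB vm tgt rc cc k.1 k.2.1 k.2.2.1 k.2.2.2)).map
        (fun k => pvMaskB rc cc k.1 k.2.1 k.2.2.1 k.2.2.2)) := by
  refine Eq.trans (pvB_foldStruct rc.length cc.length
    (fun acc k => if pvQB vm tgt rc cc k.1 k.2.1 k.2.2.1 k.2.2.2 = true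
      then PySem.Set.add acc (pvMaskB rc cc k.1 k.2.1 k.2.2.1 k.2.2.2) else acc) []) ?_
  exact pvFoldGuard _ _ _

theorem pvFinal {α β : Type} (l : List α) (p q : α → Bool) (f g : α → β)
    (hpq : ∀ a ∈ l, p a = q a) (hfg : ∀ a ∈ l, q a = true → f a = g a) :
    (l.filter p).map f = (l.filter q).map g := by
  rw [List.filter_congr hpq]
  refine List.map_congr_left ?_
  intro a ha
  exact hfg a (List.mem_filter.mp ha).1 (List.mem_filter.mp ha).2

set_option maxHeartbeats 2000000 in
theorem pvAB (table : List (List Int)) (is_dnf : Bool) :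
    get_prime_implicants_karnaugh_map table is_dnf
      = get_prime_implicants_karnaugh_map_alt table is_dnf := by
  by_cases h0 : table = []
  · subst h0; rfl
  · unfold get_prime_implicants_karnaugh_map get_prime_implicants_karnaugh_map_alt
      get_karnaugh_map_rectangles
    rw [if_neg h0, if_neg h0, if_neg h0]
    simp only [grayAlt_eq, grid_eq_pvCells, pvCells_fold, pvValid_fold,
      pvChkRow_fold, pvChkCol_fold, pvMaskB_fold, pvIfChain, pvQB_fold]
    set nv := (table.headD []).length - 1 with hnv
    set vm := pvValMap table with hvm
    set tgt : Int := (if is_dnf = true then 1 else 0) with htgt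
    set rc := generate_gray_code (nv / 2) with hrc
    set cc := generate_gray_code (nv - nv / 2) with hcc
    refine congrArg (List.map (fun m => String.mk m)) ?_
    rw [PySem.List.dedup_eq_ofList, pvA_enum2, pvAfold]
    refine Eq.trans ?_ (pvBmasks vm tgt rc cc).symm
    rw [List.filter_map, List.map_map, List.filter_filter]
    refine congrArg PySem.Set.ofList ?_
    refine pvFinal _ _ _ _ _ ?_ ?_
    · intro k hk
      obtain ⟨h, w, r, c⟩ := k
      simp only [Function.comp_apply]
      rw [primeA_eq vm tgt (nv / 2) (nv - nv / 2) rc cc hrc hcc hk]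
      simp only [pvQB, pvChkRow, pvChkCol, isValidRect_eq]
      cases hV : pvValid vm tgt rc cc h w r c <;> simp
    · intro k hk hq
      obtain ⟨h, w, r, c⟩ := k
      obtain ⟨hs, ws, _, _, _, _⟩ := mem_pvKeys.mp hk
      simp only [Function.comp]
      rw [show nv = nv / 2 + (nv - nv / 2) by omega]
      exact maskAB rc cc (hrc ▸ gray_mem_length _) (hcc ▸ gray_mem_length _)
        (hrc ▸ (by rw [gray_length]; exact Nat.two_pow_pos _))
        (hcc ▸ (by rw [gray_length]; exact Nat.two_pow_pos _))
        (pvsize_pos hs) (pvsize_pos ws)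

-- ===== VERDICT (by name: the statement is the Claim_ definition above) =====
theorem get_prime_implicants_karnaugh_map_spec :
    Claim_equal_get_prime_implicants_karnaugh_map := by
  intro table is_dnf _ _
  exact pvAB table is_dnf
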